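-- pv_equiv track=rewrite | github.com/atholh/LetsFG | sdk/python/letsfg/connectors/yatra.py | _resolve_dom2_leg_key
-- ===== SOURCE A (Python) =====
-- from typing import Any, Optional
--
-- def _resolve_dom2_leg_key(
--
--     fare_details: dict,
--     origin: str,
--     destination: str,
--     date_yyyymmdd: str,
-- ) -> Optional[str]:
--     """Resolve Yatra dom2 fareDetails leg key.
--
--     Normally keys are ORGDESTYYYYMMDD (e.g. DELBOM20260801), but Yatra can
--     substitute nearby airports (e.g. NMI) depending on inventory/UI state.
--     """
--     exact = f"{origin}{destination}{date_yyyymmdd}"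
--     if exact in fare_details:
--         return exact
--
--     keys = [k for k in fare_details.keys() if isinstance(k, str)]
--     candidates = [k for k in keys if k.endswith(date_yyyymmdd) and len(k) >= 14]
--     if not candidates:
--         return None
--
--     # Score candidates to tolerate nearby-airport substitutions (e.g., BOM <-> NMI)
--     # while still preferring exact route matches.
--     ranked: list[tuple[int, str]] = []
--     for k in candidates:
--         src = k[:3]
--         dst = k[3:6]
--         score = 0
--         if src == origin:
--             score += 4
--         if dst == destination:
--             score += 3
--         ranked.append((score, k))
--
--     ranked.sort(key=lambda t: t[0], reverse=True)
--     best_score, best_key = ranked[0]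
--     return best_key if best_score > 0 else None
-- ===== SOURCE B (Python) =====
-- from typing import Optional
--
-- def _resolve_dom2_leg_key(
--     fare_details: dict,
--     origin: str,
--     destination: str,
--     date_yyyymmdd: str,
-- ) -> Optional[str]:
--     """Single-pass variant: scan the keys once, keeping the first key with the
--     strictly highest score (exact-key early return unchanged)."""
--     exact = f"{origin}{destination}{date_yyyymmdd}"
--     if exact in fare_details:
--         return exact
--
--     best_key = None
--     best_score = -1
--     for k in fare_details:
--         if not isinstance(k, str) or not k.endswith(date_yyyymmdd) or len(k) < 14:
--             continue
--         score = (4 if k[:3] == origin else 0) + (3 if k[3:6] == destination else 0)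
--         if score > best_score:
--             best_score, best_key = score, k
--     if best_key is None or best_score == 0:
--         return None
--     return best_key
-- ===== Notes on version B (the rewrite author's own statement) =====
-- stated objective: alternative
-- what changed: Replaces the build-all-candidates + build-ranked-pairs + stable-descending-sort + take-first pipeline with a single linear pass over the dict keys that keeps a running (best_score, best_key), updating only on strict improvement so the first-encountered maximum wins.
import Mathlib
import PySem

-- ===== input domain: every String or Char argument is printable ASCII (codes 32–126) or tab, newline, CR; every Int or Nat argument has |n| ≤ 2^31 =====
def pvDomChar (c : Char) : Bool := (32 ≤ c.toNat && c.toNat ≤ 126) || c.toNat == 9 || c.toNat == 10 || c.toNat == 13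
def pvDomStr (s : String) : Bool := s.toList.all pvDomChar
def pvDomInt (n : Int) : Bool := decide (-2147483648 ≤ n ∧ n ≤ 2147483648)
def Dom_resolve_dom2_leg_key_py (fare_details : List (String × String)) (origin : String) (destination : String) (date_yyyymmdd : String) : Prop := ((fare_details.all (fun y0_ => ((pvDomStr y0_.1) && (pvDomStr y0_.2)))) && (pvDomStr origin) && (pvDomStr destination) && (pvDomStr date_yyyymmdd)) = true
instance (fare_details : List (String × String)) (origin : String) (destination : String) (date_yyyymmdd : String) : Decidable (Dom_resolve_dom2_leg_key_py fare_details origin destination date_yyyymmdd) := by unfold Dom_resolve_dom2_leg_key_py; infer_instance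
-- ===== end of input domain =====

-- B replaces A's filter + ranked-pairs + stable descending sort + take-first pipeline
-- with a single pass over the dict keys keeping a running (best_score, best_key).


-- ===== PORT A =====
def resolve_dom2_leg_key_py (fare_details : List (String × String)) (origin : String) (destination : String) (date_yyyymmdd : String) : Option String :=
  let fd := PySem.Dict.ofList fare_details
  let exact := PySem.Str.join "" [origin, destination, date_yyyymmdd]
  if PySem.Dict.contains fd exact then some exact
  else
    let keys := PySem.Dict.keys fd
    let candidates := keys.filter (fun k => PySem.Str.endswith k date_yyyymmdd && decide (14 ≤ PySem.Str.len k))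
    if candidates.isEmpty then none
    else
      let ranked : List (Int × String) := candidates.foldl (fun acc k =>
        let src := PySem.Str.slice k none (some 3)
        let dst := PySem.Str.slice k (some 3) (some 6)
        let score : Int := 0
        let score := if src == origin then score + 4 else score
        let score := if dst == destination then score + 3 else score
        acc ++ [(score, k)]) []
      let ranked := PySem.List.sorted ranked (fun t => t.1) true
      match ranked with
      | [] => none
      | (best_score, best_key) :: _ => if best_score > 0 then some best_key else none

-- ===== PORT B =====
def resolve_dom2_leg_key_py_alt (fare_details : List (String × String)) (origin : String) (destination : String) (date_yyyymmdd : String) : Option String :=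
  let fd := PySem.Dict.ofList fare_details
  let exact := PySem.Str.join "" [origin, destination, date_yyyymmdd]
  if PySem.Dict.contains fd exact then some exact
  else
    let best := (PySem.Dict.keys fd).foldl (fun (b : Int × Option String) k =>
      if !(PySem.Str.endswith k date_yyyymmdd) || decide (PySem.Str.len k < 14) then b
      else
        let score : Int := (if PySem.Str.slice k none (some 3) == origin then 4 else 0) +
                           (if PySem.Str.slice k (some 3) (some 6) == destination then 3 else 0)
        if b.1 < score then (score, some k) else b) ((-1 : Int), (none : Option String))
    match best.2 with
    | none => none
    | some k => if best.1 = 0 then none else some k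

-- ===== PRECONDITION & SPEC =====
def Spec_resolve_dom2_leg_key_py (fare_details : List (String × String)) (origin : String) (destination : String) (date_yyyymmdd : String) (out : Option String) : Prop := out = resolve_dom2_leg_key_py_alt fare_details origin destination date_yyyymmdd
instance (fare_details : List (String × String)) (origin : String) (destination : String) (date_yyyymmdd : String) (out : Option String) : Decidable (Spec_resolve_dom2_leg_key_py fare_details origin destination date_yyyymmdd out) := by unfold Spec_resolve_dom2_leg_key_py; infer_instance

-- ===== CLAIM (what is proved, stated in full; the proofs are below) =====
def Claim_equal_resolve_dom2_leg_key_py : Prop := ∀ (fare_details : List (String × String)) (origin : String) (destination : String) (date_yyyymmdd : String), Dom_resolve_dom2_leg_key_py fare_details origin destination date_yyyymmdd → Spec_resolve_dom2_leg_key_py fare_details origin destination date_yyyymmdd (resolve_dom2_leg_key_py fare_details origin destination date_yyyymmdd)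

-- ===== LEMMAS AND PROOFS =====

-- B's score for a candidate key
def pvScore (origin destination k : String) : Int :=
  (if PySem.Str.slice k none (some 3) == origin then 4 else 0) +
  (if PySem.Str.slice k (some 3) (some 6) == destination then 3 else 0)

lemma pvScore_nonneg (origin destination k : String) : 0 ≤ pvScore origin destination k := by
  unfold pvScore; split_ifs <;> norm_num

-- A's let-chained score equals B's sum-of-ifs score
lemma pv_score_eq (a b : Bool) :
    (if b then (if a then (0 : Int) + 4 else 0) + 3 else (if a then (0 : Int) + 4 else 0))
      = (if a then (4 : Int) else 0) + (if b then 3 else 0) := by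
  cases a <;> cases b <;> norm_num

-- "first element with strictly greater key wins" accumulator: the head of a
-- stable descending sort and B's running best both fold with this step.
def pvG (b : Option (Int × String)) (p : Int × String) : Option (Int × String) :=
  match b with
  | none => some p
  | some q => if q.1 < p.1 then some p else some q

lemma pv_head_insertBy (s : List (Int × String)) (x : Int × String) :
    (PySem.List.insertBy (fun a b => decide (b.1 < a.1)) x s).head? = pvG s.head? x := by
  cases s with
  | nil => rfl
  | cons h t =>
      simp only [PySem.List.insertBy, pvG, List.head?]
      by_cases hlt : h.1 < x.1 <;> simp [hlt]

-- head of Python's stable reverse sort by fst = left fold of pvG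
lemma pv_head_sorted_rev (l : List (Int × String)) :
    (PySem.List.sorted l (fun t => t.1) true).head? = l.foldl pvG none := by
  show (l.foldl (fun acc x => PySem.List.insertBy (fun a b => decide (b.1 < a.1)) x acc) []).head?
        = l.foldl pvG none
  induction l using List.reverseRecOn with
  | nil => rfl
  | append_singleton l x ih =>
      simp only [List.foldl_append, List.foldl_cons, List.foldl_nil, pv_head_insertBy, ih]

lemma pv_foldl_pvG_some (l : List (Int × String)) (q : Int × String) :
    l.foldl pvG (some q) ≠ none := by
  induction l generalizing q with
  | nil => simp
  | cons y ys ih =>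
      simp only [List.foldl_cons, pvG]
      split_ifs <;> exact ih _

lemma pv_foldl_pvG_mem (l : List (Int × String)) (p : Int × String)
    (h : l.foldl pvG none = some p) : p ∈ l := by
  induction l using List.reverseRecOn with
  | nil => simp at h
  | append_singleton l x ih =>
      rw [List.foldl_append, List.foldl_cons, List.foldl_nil] at h
      cases hl : l.foldl pvG none with
      | none => rw [hl] at h; simp only [pvG] at h; injection h with h; simp [h]
      | some q =>
          rw [hl] at h
          simp only [pvG] at h
          by_cases hlt : q.1 < x.1
          · rw [if_pos hlt] at h; injection h with h; simp [h]
          · rw [if_neg hlt] at h; injection h with h; subst h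
            exact List.mem_append_left _ (ih hl)

-- B's running best over cs = pvG-fold over the (score, key) pairs
lemma pv_foldl_best (f : String → Int) (hf : ∀ k, 0 ≤ f k) (cs : List String) :
    cs.foldl (fun b k => if b.1 < f k then (f k, some k) else b) ((-1 : Int), (none : Option String))
      = (match (cs.map (fun k => (f k, k))).foldl pvG none with
          | none => ((-1 : Int), (none : Option String))
          | some p => (p.1, some p.2)) := by
  induction cs using List.reverseRecOn with
  | nil => rfl
  | append_singleton l x ih =>
      rw [List.foldl_append, List.map_append, List.foldl_append]
      simp only [List.foldl_cons, List.foldl_nil, List.map_cons, List.map_nil]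
      rw [ih]
      cases hl : (l.map (fun k => (f k, k))).foldl pvG none with
      | none =>
          have hx : (-1 : Int) < f x := lt_of_lt_of_le (by norm_num) (hf x)
          simp [pvG, hx]
      | some q =>
          simp only [pvG]
          by_cases hlt : q.1 < f x <;> simp [hlt]

-- the whole non-exact branch of A equals the whole non-exact branch of B,
-- for an arbitrary key list ks
lemma pv_main (origin destination date_yyyymmdd : String) (ks : List String) :
    (if (ks.filter (fun k => PySem.Str.endswith k date_yyyymmdd && decide (14 ≤ PySem.Str.len k))).isEmpty then none
     else
       match PySem.List.sorted
           ((ks.filter (fun k => PySem.Str.endswith k date_yyyymmdd && decide (14 ≤ PySem.Str.len k))).foldl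
             (fun (acc : List (Int × String)) k =>
               acc ++ [(if PySem.Str.slice k (some 3) (some 6) == destination
                        then (if PySem.Str.slice k none (some 3) == origin then (0 : Int) + 4 else 0) + 3
                        else (if PySem.Str.slice k none (some 3) == origin then (0 : Int) + 4 else 0), k)]) [])
           (fun t => t.1) true with
       | [] => none
       | (best_score, best_key) :: _ => if best_score > 0 then some best_key else none)
    = (let best := ks.foldl (fun (b : Int × Option String) k =>
        if !(PySem.Str.endswith k date_yyyymmdd) || decide (PySem.Str.len k < 14) then b
        else if b.1 < pvScore origin destination k then (pvScore origin destination k, some k) else b)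
        ((-1 : Int), (none : Option String))
       match best.2 with
       | none => none
       | some k => if best.1 = 0 then none else some k) := by
  -- B's skip-guard = candidate filter, applied to the best-update step
  have hB : (fun (b : Int × Option String) k =>
        if !(PySem.Str.endswith k date_yyyymmdd) || decide (PySem.Str.len k < 14) then b
        else if b.1 < pvScore origin destination k then (pvScore origin destination k, some k) else b)
      = (fun (b : Int × Option String) k =>
        if PySem.Str.endswith k date_yyyymmdd && decide (14 ≤ PySem.Str.len k)
        then (if b.1 < pvScore origin destination k then (pvScore origin destination k, some k) else b)
        else b) := by
    funext b k
    by_cases he : PySem.Chars.endswith k.toList date_yyyymmdd.toList = true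
    · by_cases hl : 14 ≤ k.length
      · simp [he, hl, Nat.not_lt.mpr hl]
      · simp [he, hl, Nat.lt_of_not_le hl]
    · simp [he]
  rw [hB, ← List.foldl_filter]
  -- A's ranked build is the score/key map over the candidates
  have hA : ∀ cs : List String,
      cs.foldl (fun (acc : List (Int × String)) k =>
          acc ++ [(if PySem.Str.slice k (some 3) (some 6) == destination
                   then (if PySem.Str.slice k none (some 3) == origin then (0 : Int) + 4 else 0) + 3
                   else (if PySem.Str.slice k none (some 3) == origin then (0 : Int) + 4 else 0), k)]) []
        = cs.map (fun k => (pvScore origin destination k, k)) := by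
    intro cs
    induction cs using List.reverseRecOn with
    | nil => rfl
    | append_singleton l x ih =>
        rw [List.foldl_append, List.map_append, ih]
        simp only [List.foldl_cons, List.foldl_nil, List.map_cons, List.map_nil, pvScore, pv_score_eq]
  rw [hA]
  cases hcse : ks.filter (fun k => PySem.Str.endswith k date_yyyymmdd && decide (14 ≤ PySem.Str.len k)) with
  | nil => simp
  | cons c cs' =>
      rw [pv_foldl_best (pvScore origin destination) (pvScore_nonneg origin destination)]
      simp only [List.isEmpty_cons, Bool.false_eq_true, if_false]
      cases hp : ((c :: cs').map (fun k => (pvScore origin destination k, k))).foldl pvG none with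
      | none =>
          exfalso
          rw [List.map_cons, List.foldl_cons] at hp
          exact pv_foldl_pvG_some _ _ hp
      | some p =>
          have hhead : (PySem.List.sorted ((c :: cs').map (fun k => (pvScore origin destination k, k))) (fun t => t.1) true).head? = some p := by
            rw [pv_head_sorted_rev, hp]
          have hp0 : 0 ≤ p.1 := by
            have hmem := pv_foldl_pvG_mem _ _ hp
            rw [List.mem_map] at hmem
            obtain ⟨k, _, hk⟩ := hmem
            rw [← hk]
            exact pvScore_nonneg origin destination k
          cases hs : PySem.List.sorted ((c :: cs').map (fun k => (pvScore origin destination k, k))) (fun t => t.1) true with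
          | nil => rw [hs] at hhead; simp at hhead
          | cons h t =>
              rw [hs] at hhead
              simp only [List.head?] at hhead
              injection hhead with hh
              subst hh
              obtain ⟨s, k⟩ := h
              by_cases hz : s = 0
              · subst hz; simp
              · have hpos : 0 < s := lt_of_le_of_ne hp0 (Ne.symm hz)
                simp [hz, hpos]

-- ===== VERDICT (by name: the statement is the Claim_ definition above) =====
theorem resolve_dom2_leg_key_py_spec : Claim_equal_resolve_dom2_leg_key_py := by
  intro fare_details origin destination date_yyyymmdd _
  unfold Spec_resolve_dom2_leg_key_py resolve_dom2_leg_key_py resolve_dom2_leg_key_py_alt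
  by_cases hc : PySem.Dict.contains (PySem.Dict.ofList fare_details) (PySem.Str.join "" [origin, destination, date_yyyymmdd]) = true
  · simp only [hc, if_true]
  · simp only [hc, if_false, Bool.false_eq_true]
    exact pv_main origin destination date_yyyymmdd (PySem.Dict.keys (PySem.Dict.ofList fare_details))
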